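-- pv_equiv track=rewrite | github.com/ChrisThomasGAPAC/GP-CNC-Builder | dtp.py | _safe_file_stem
-- ===== SOURCE A (Python) =====
-- def _safe_file_stem(name: str) -> str:
--     allowed = []
--     for char in name.lower().strip():
--         if char.isalnum():
--             allowed.append(char)
--         elif char in {" ", "-", "_"}:
--             allowed.append("_")
--     stem = "".join(allowed).strip("_")
--     while "__" in stem:
--         stem = stem.replace("__", "_")
--     return stem
-- ===== SOURCE B (Python) =====
-- def _safe_file_stem(name: str) -> str:
--     out = []
--     pending = False
--     for ch in name.lower().strip():
--         if ch.isalnum():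
--             if pending and out:
--                 out.append("_")
--             out.append(ch)
--             pending = False
--         elif ch in " -_":
--             pending = True
--     return "".join(out)
-- ===== Notes on version B (the rewrite author's own statement) =====
-- stated objective: simpler
-- what changed: Replaced A's build-list / join / strip-underscores / repeated-replace multi-pass pipeline by a single left-to-right pass with a pending-separator flag that emits at most one separator between alphanumeric runs, so no post-processing passes exist at all.
import Mathlib
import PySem

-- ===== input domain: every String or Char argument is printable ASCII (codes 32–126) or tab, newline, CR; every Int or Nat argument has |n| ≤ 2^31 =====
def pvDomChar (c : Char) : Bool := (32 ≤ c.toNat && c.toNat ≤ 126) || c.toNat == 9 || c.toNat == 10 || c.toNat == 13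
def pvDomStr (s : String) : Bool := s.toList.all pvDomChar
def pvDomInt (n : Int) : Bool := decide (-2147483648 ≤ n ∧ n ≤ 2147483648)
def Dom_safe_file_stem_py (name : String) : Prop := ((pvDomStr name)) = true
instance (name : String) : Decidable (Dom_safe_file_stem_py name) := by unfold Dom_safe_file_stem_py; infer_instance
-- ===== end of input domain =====

-- B replaces A's build/join/strip/while-replace multi-pass pipeline by a single
-- left-to-right pass with a pending-separator flag; return values proved equal, no mutation involved.

-- ===== PORT A =====

-- pvRepNF characterises one pass of Python's stem.replace("__", "_") (leftmost, non-overlapping);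
-- it is needed BEFORE the port to prove termination of the 'while "__" in stem' loop.
def pvRepNF : List Char → List Char
  | [] => []
  | '_' :: '_' :: t => '_' :: pvRepNF t
  | c :: t => c :: pvRepNF t

theorem pvRepNF_cons (c : Char) (t : List Char)
    (h : ¬ (c = '_' ∧ ∃ t1, t = '_' :: t1)) : pvRepNF (c :: t) = c :: pvRepNF t := by
  cases t with
  | nil => rw [pvRepNF.eq_def]; by_cases hc : c = '_' <;> simp [hc]
  | cons d t1 =>
    by_cases hc : c = '_' <;> by_cases hd : d = '_'
    · exact absurd ⟨hc, t1, by rw [hd]⟩ h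
    · subst hc; rw [pvRepNF.eq_def]; simp [hd]
    · subst hd; rw [pvRepNF.eq_def]; simp [hc]
    · rw [pvRepNF.eq_def]; simp [hc, hd]

theorem pvGo_eq (fuel : Nat) (l acc : List Char) (h : l.length ≤ fuel) :
    PySem.Chars.replace.go ['_', '_'] ['_'] fuel l acc = acc.reverse ++ pvRepNF l := by
  induction fuel generalizing l acc with
  | zero =>
    have : l = [] := by cases l <;> simp_all
    subst this; simp [PySem.Chars.replace.go, pvRepNF]
  | succ n ih =>
    cases l with
    | nil => simp [PySem.Chars.replace.go, pvRepNF]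
    | cons c t =>
      by_cases hp : (['_', '_'] : List Char).isPrefixOf (c :: t)
      · obtain ⟨rfl, t1, rfl⟩ : c = '_' ∧ ∃ t1, t = '_' :: t1 := by
          cases t with
          | nil => simp [List.isPrefixOf] at hp
          | cons d t1 =>
            simp [List.isPrefixOf] at hp
            exact ⟨hp.1.symm, t1, by rw [← hp.2]⟩
        simp only [PySem.Chars.replace.go, hp, if_pos]
        rw [ih _ _ (by simp at h ⊢; omega)]
        simp [pvRepNF]
      · have hne : ¬(c = '_' ∧ ∃ t1, t = '_' :: t1) := by
          rintro ⟨rfl, t1, rfl⟩; simp [List.isPrefixOf] at hp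
        simp only [PySem.Chars.replace.go, hp, if_neg, Bool.false_eq_true, not_false_iff]
        rw [ih _ _ (by simp at h ⊢; omega)]
        rw [pvRepNF_cons c t hne]; simp

theorem pvReplace_eq (m : List Char) :
    PySem.Chars.replace m ['_', '_'] ['_'] = pvRepNF m := by
  have := pvGo_eq m.length m [] le_rfl
  simpa [PySem.Chars.replace] using this

theorem pvRepNF_length_le (m : List Char) : (pvRepNF m).length ≤ m.length := by
  induction m using pvRepNF.induct with
  | case1 => simp [pvRepNF]
  | case2 t ih => simp only [pvRepNF]; simp; omega
  | case3 c t hne ih =>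
    rw [pvRepNF_cons c t (by rintro ⟨rfl, t1, rfl⟩; exact hne t1 rfl rfl)]
    simpa using Nat.succ_le_succ ih

theorem pvRepNF_length_lt (m : List Char) (h : ['_', '_'] <:+: m) :
    (pvRepNF m).length < m.length := by
  induction m using pvRepNF.induct with
  | case1 => simp at h
  | case2 t ih =>
    have := pvRepNF_length_le t
    simp only [pvRepNF]; simp; omega
  | case3 c t hne ih =>
    have hcne : ¬(c = '_' ∧ ∃ t1, t = '_' :: t1) := by
      rintro ⟨rfl, t1, rfl⟩; exact hne t1 rfl rfl
    have hct : ['_', '_'] <:+: t := by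
      rcases List.infix_cons_iff.mp h with hpre | hinf
      · obtain ⟨s, hs⟩ := hpre
        cases t with
        | nil => simp at hs
        | cons d t1 =>
          simp at hs
          exact absurd ⟨hs.1.symm, t1, by rw [hs.2.1]⟩ hcne
      · exact hinf
    rw [pvRepNF_cons c t hcne]
    simpa using Nat.succ_lt_succ (ih hct)

-- while "__" in stem: stem = stem.replace("__", "_")
def pvCollapse (stem : List Char) : List Char :=
  if h : PySem.Chars.isIn ['_', '_'] stem then
    pvCollapse (PySem.Chars.replace stem ['_', '_'] ['_'])
  else stem
termination_by stem.length
decreasing_by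
  rw [pvReplace_eq]
  exact pvRepNF_length_lt _ ((PySem.Chars.isIn_iff_infix _ _).mp h)

-- 'allowed' holds single-character strings in Python; it is modeled as List Char,
-- so that "".join(allowed) is the list itself.
def safe_file_stem_py (name : String) : String :=
  let allowed := (PySem.Chars.strip (PySem.Chars.lower name.toList)).foldl
    (fun acc c =>
      if PySem.Chars.isalnum c then acc ++ [c]
      else if c == ' ' || c == '-' || c == '_' then acc ++ ['_']
      else acc) []
  let stem := PySem.Chars.stripChars allowed ['_']
  String.ofList (pvCollapse stem)

-- ===== PORT B =====
-- one pass: state = (out, pending); 'out' holds single characters, modeled as List Char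
def safe_file_stem_py_alt (name : String) : String :=
  let r := (PySem.Chars.strip (PySem.Chars.lower name.toList)).foldl
    (fun (st : List Char × Bool) ch =>
      if PySem.Chars.isalnum ch then
        ((if st.2 && !st.1.isEmpty then st.1 ++ ['_'] else st.1) ++ [ch], false)
      else if ch == ' ' || ch == '-' || ch == '_' then (st.1, true)
      else st) ([], false)
  String.ofList r.1

-- ===== PRECONDITION & SPEC =====
def Spec_safe_file_stem_py (name : String) (out : String) : Prop := out = safe_file_stem_py_alt name
instance (name : String) (out : String) : Decidable (Spec_safe_file_stem_py name out) := by unfold Spec_safe_file_stem_py; infer_instance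

-- ===== CLAIM (what is proved, stated in full; the proofs are below) =====
def Claim_equal_safe_file_stem_py : Prop := ∀ (name : String), Dom_safe_file_stem_py name → Spec_safe_file_stem_py name (safe_file_stem_py name)

-- ===== LEMMAS AND PROOFS =====

def pvSep (c : Char) : Bool := c == ' ' || c == '-' || c == '_'

-- canonical result: mode = false while no character emitted since the last separator gap was closed
def pvCanon : List Char → Bool → List Char
  | [], _ => []
  | c :: t, false => if PySem.Chars.isalnum c then c :: pvCanon t true else pvCanon t false
  | c :: t, true =>
      if PySem.Chars.isalnum c then c :: pvCanon t true
      else if pvSep c then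
        (match pvCanon t false with
         | [] => []
         | r => '_' :: r)
      else pvCanon t true

def pvFilt (s : List Char) : List Char :=
  s.filterMap (fun c =>
    if PySem.Chars.isalnum c then some c
    else if pvSep c then some '_' else none)

def pvOK (c : Char) : Prop := PySem.Chars.isalnum c = true ∨ c = '_'

theorem pvFilt_cons (c : Char) (t : List Char) :
    pvFilt (c :: t) =
      if PySem.Chars.isalnum c then c :: pvFilt t
      else if pvSep c then '_' :: pvFilt t
      else pvFilt t := by
  simp only [pvFilt, List.filterMap_cons]
  by_cases h1 : PySem.Chars.isalnum c
  · simp [h1]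
  · by_cases h2 : pvSep c = true <;> simp [h1, h2]

theorem pvFoldA (s : List Char) (acc : List Char) :
    s.foldl (fun acc c =>
      if PySem.Chars.isalnum c then acc ++ [c]
      else if c == ' ' || c == '-' || c == '_' then acc ++ ['_']
      else acc) acc = acc ++ pvFilt s := by
  induction s generalizing acc with
  | nil => simp [pvFilt]
  | cons c t ih =>
    simp only [List.foldl_cons, pvFilt_cons]
    by_cases h1 : PySem.Chars.isalnum c
    · rw [if_pos h1, if_pos h1, ih]; simp
    · by_cases h2 : (c == ' ' || c == '-' || c == '_') = true
      · have h3 : pvSep c = true := h2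
        rw [if_neg h1, if_pos h2, if_neg h1, if_pos h3, ih]; simp
      · have h3 : pvSep c = false := by simpa [pvSep] using h2
        rw [if_neg h1, if_neg h2, if_neg h1, if_neg (by simp [h3]), ih]

theorem pvFoldB (s : List Char) (out : List Char) (p : Bool) :
    (s.foldl (fun (st : List Char × Bool) ch =>
      if PySem.Chars.isalnum ch then
        ((if st.2 && !st.1.isEmpty then st.1 ++ ['_'] else st.1) ++ [ch], false)
      else if ch == ' ' || ch == '-' || ch == '_' then (st.1, true)
      else st) (out, p)).1 =
    if out.isEmpty then pvCanon s false
    else out ++ (if p then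
        (match pvCanon s false with
         | [] => []
         | r => '_' :: r)
      else pvCanon s true) := by
  induction s generalizing out p with
  | nil => cases out <;> cases p <;> simp [pvCanon]
  | cons ch t ih =>
    simp only [List.foldl_cons]
    by_cases h1 : PySem.Chars.isalnum ch
    · rw [if_pos h1, ih]
      rcases out with _ | ⟨o, os⟩ <;> cases p <;> simp [pvCanon, h1]
    · by_cases h2 : (ch == ' ' || ch == '-' || ch == '_') = true
      · rw [if_neg h1, if_pos h2, ih]
        have h3 : pvSep ch = true := h2
        rcases out with _ | ⟨o, os⟩ <;> cases p <;> simp [pvCanon, h1, h3]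
      · rw [if_neg h1, if_neg h2, ih]
        have h3 : pvSep ch = false := by simpa [pvSep] using h2
        rcases out with _ | ⟨o, os⟩ <;> cases p <;> simp [pvCanon, h1, h3]

theorem pvCanon_filt (s : List Char) (mode : Bool) :
    pvCanon (pvFilt s) mode = pvCanon s mode := by
  induction s generalizing mode with
  | nil => rfl
  | cons c t ih =>
    rw [pvFilt_cons]
    by_cases h1 : PySem.Chars.isalnum c
    · cases mode <;> simp [pvCanon, h1, ih]
    · by_cases h2 : pvSep c = true
      · have hu1 : PySem.Chars.isalnum '_' = false := by decide
        have hu2 : pvSep '_' = true := by decide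
        cases mode <;> simp [pvCanon, h1, h2, hu1, hu2, ih]
      · cases mode <;> simp [pvCanon, h1, h2, ih]

theorem pvCanon_repNF (m : List Char) : ∀ mode, pvCanon (pvRepNF m) mode = pvCanon m mode := by
  induction m using pvRepNF.induct with
  | case1 => intro mode; rfl
  | case2 t ih =>
    intro mode
    have hu1 : PySem.Chars.isalnum '_' = false := by decide
    have hu2 : pvSep '_' = true := by decide
    cases mode <;> simp [pvRepNF, pvCanon, hu1, hu2, ih]
  | case3 c t hne ih =>
    intro mode
    rw [pvRepNF_cons c t (by rintro ⟨rfl, t1, rfl⟩; exact hne t1 rfl rfl)]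
    by_cases h1 : PySem.Chars.isalnum c
    · cases mode <;> simp [pvCanon, h1, ih]
    · by_cases h2 : pvSep c = true
      · cases mode <;> simp [pvCanon, h1, h2, ih]
      · cases mode <;> simp [pvCanon, h1, h2, ih]

theorem pvCanon_collapse (m : List Char) : pvCanon (pvCollapse m) false = pvCanon m false := by
  induction m using pvCollapse.induct with
  | case1 x hin ih =>
    rw [pvCollapse.eq_def, dif_pos hin]
    rw [ih, pvReplace_eq, pvCanon_repNF]
  | case2 x hin => rw [pvCollapse.eq_def, dif_neg hin]

theorem pvCollapse_noDD (m : List Char) : ¬ (['_', '_'] <:+: pvCollapse m) := by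
  induction m using pvCollapse.induct with
  | case1 x hin ih => rw [pvCollapse.eq_def, dif_pos hin]; exact ih
  | case2 x hin =>
    rw [pvCollapse.eq_def, dif_neg hin]
    exact (PySem.Chars.isIn_eq_false_iff _ _).mp (by simpa using hin)

theorem pvRepNF_mem (m : List Char) : ∀ c ∈ pvRepNF m, c ∈ m := by
  induction m using pvRepNF.induct with
  | case1 => simp [pvRepNF]
  | case2 t ih =>
    intro c hc
    simp only [pvRepNF, List.mem_cons] at hc
    rcases hc with rfl | hc
    · simp
    · simp [ih c hc]
  | case3 c t hne ih =>
    rw [pvRepNF_cons c t (by rintro ⟨rfl, t1, rfl⟩; exact hne t1 rfl rfl)]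
    intro d hd
    rcases List.mem_cons.mp hd with rfl | hd
    · simp
    · simp [ih d hd]

theorem pvCollapse_mem (m : List Char) : ∀ c ∈ pvCollapse m, c ∈ m := by
  induction m using pvCollapse.induct with
  | case1 x hin ih =>
    rw [pvCollapse.eq_def, dif_pos hin]
    intro c hc
    have := ih c hc
    rw [pvReplace_eq] at this
    exact pvRepNF_mem x c this
  | case2 x hin => rw [pvCollapse.eq_def, dif_neg hin]; exact fun _ h => h

theorem pvRepNF_head? (m : List Char) : (pvRepNF m).head? = m.head? := by
  induction m using pvRepNF.induct with
  | case1 => rfl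
  | case2 t ih => simp [pvRepNF]
  | case3 c t hne ih =>
    rw [pvRepNF_cons c t (by rintro ⟨rfl, t1, rfl⟩; exact hne t1 rfl rfl)]
    simp

theorem pvRepNF_ne_nil (m : List Char) (h : m ≠ []) : pvRepNF m ≠ [] := by
  induction m using pvRepNF.induct with
  | case1 => exact absurd rfl h
  | case2 t ih => simp [pvRepNF]
  | case3 c t hne ih =>
    rw [pvRepNF_cons c t (by rintro ⟨rfl, t1, rfl⟩; exact hne t1 rfl rfl)]
    simp

theorem pvGetLast?_cons (c : Char) (t : List Char) (ht : t ≠ []) :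
    (c :: t).getLast? = t.getLast? := by
  rw [List.getLast?_cons]
  cases t with
  | nil => exact absurd rfl ht
  | cons d t1 => simp [List.getLast?_cons]

theorem pvRepNF_getLast? (m : List Char) (h : m.getLast? ≠ some '_') :
    (pvRepNF m).getLast? ≠ some '_' := by
  induction m using pvRepNF.induct with
  | case1 => simpa [pvRepNF] using h
  | case2 t ih =>
    have ht : t ≠ [] := by rintro rfl; simp at h
    have hlt : t.getLast? ≠ some '_' := by
      rwa [pvGetLast?_cons _ _ (by simp), pvGetLast?_cons _ _ ht] at h
    rw [show pvRepNF ('_' :: '_' :: t) = '_' :: pvRepNF t from rfl,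
        pvGetLast?_cons _ _ (pvRepNF_ne_nil t ht)]
    exact ih hlt
  | case3 c t hne ih =>
    rw [pvRepNF_cons c t (by rintro ⟨rfl, t1, rfl⟩; exact hne t1 rfl rfl)]
    cases ht : t with
    | nil =>
      subst ht
      simpa [pvRepNF] using h
    | cons d t1 =>
      subst ht
      have hlt : (d :: t1).getLast? ≠ some '_' := by
        rwa [pvGetLast?_cons _ _ (by simp)] at h
      rw [pvGetLast?_cons _ _ (pvRepNF_ne_nil _ (by simp))]
      exact ih hlt

theorem pvCollapse_head? (m : List Char) : (pvCollapse m).head? = m.head? := by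
  induction m using pvCollapse.induct with
  | case1 x hin ih =>
    rw [pvCollapse.eq_def, dif_pos hin]
    rw [ih, pvReplace_eq, pvRepNF_head?]
  | case2 x hin => rw [pvCollapse.eq_def, dif_neg hin]

theorem pvCollapse_getLast? (m : List Char) (h : m.getLast? ≠ some '_') :
    (pvCollapse m).getLast? ≠ some '_' := by
  induction m using pvCollapse.induct with
  | case1 x hin ih =>
    rw [pvCollapse.eq_def, dif_pos hin]
    exact ih (by rw [pvReplace_eq]; exact pvRepNF_getLast? x h)
  | case2 x hin => rw [pvCollapse.eq_def, dif_neg hin]; exact h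

-- final characterisation: on a clean string pvCanon is the identity
theorem pvCanon_id (m : List Char) :
    ((∀ c ∈ m, pvOK c) → ¬ (['_', '_'] <:+: m) → m.getLast? ≠ some '_' →
      pvCanon m true = m) ∧
    ((∀ c ∈ m, pvOK c) → ¬ (['_', '_'] <:+: m) → m.getLast? ≠ some '_' →
      m.head? ≠ some '_' → pvCanon m false = m) := by
  induction m with
  | nil => exact ⟨fun _ _ _ => rfl, fun _ _ _ _ => rfl⟩
  | cons c t ih =>
    have hdd : ¬ (['_', '_'] <:+: c :: t) → ¬ (['_', '_'] <:+: t) := by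
      intro h hc; exact h (hc.trans (List.IsSuffix.isInfix ⟨[c], rfl⟩))
    have hlast : t ≠ [] → (c :: t).getLast? = t.getLast? :=
      pvGetLast?_cons c t
    constructor
    · intro hok hnd hl
      have hokt : ∀ c ∈ t, pvOK c := fun d hd => hok d (List.mem_cons_of_mem c hd)
      by_cases h1 : PySem.Chars.isalnum c
      · simp only [pvCanon, h1, if_pos]
        congr 1
        cases ht : t with
        | nil => rfl
        | cons d t1 =>
          subst ht
          exact ih.1 hokt (hdd hnd) (by rwa [hlast (by simp)] at hl)
      · have hc : c = '_' := by rcases hok c List.mem_cons_self with h | h; exact absurd h h1; exact h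
        subst hc
        have hs : pvSep '_' = true := by decide
        simp only [pvCanon, h1, hs, Bool.false_eq_true, if_false, if_pos]
        have ht : t ≠ [] := by rintro rfl; simp at hl
        have hth : t.head? ≠ some '_' := by
          intro hh
          cases t with
          | nil => simp at hh
          | cons d t1 =>
            simp at hh
            exact hnd (by rw [hh]; exact List.infix_cons_iff.mpr (Or.inl (by simp [List.prefix_cons_iff])))
        have := ih.2 hokt (hdd hnd) (by rwa [hlast ht] at hl) hth
        rw [this]
        cases t with
        | nil => exact absurd rfl ht
        | cons d t1 => rfl
    · intro hok hnd hl hh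
      have hokt : ∀ c ∈ t, pvOK c := fun d hd => hok d (List.mem_cons_of_mem c hd)
      have h1 : PySem.Chars.isalnum c = true := by
        rcases hok c List.mem_cons_self with h | h
        · exact h
        · exact absurd (by rw [h]; rfl : (c :: t).head? = some '_') hh
      simp only [pvCanon, h1, if_pos]
      congr 1
      cases ht : t with
      | nil => rfl
      | cons d t1 =>
        subst ht
        exact ih.1 hokt (hdd hnd) (by rwa [hlast (by simp)] at hl)

theorem pvCanon_underscores (suf : List Char) (hs : ∀ c ∈ suf, c = '_') :
    pvCanon suf false = [] := by
  induction suf with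
  | nil => rfl
  | cons c t ih =>
    have hc : c = '_' := hs c List.mem_cons_self
    subst hc
    have h1 : PySem.Chars.isalnum '_' = false := by decide
    simp only [pvCanon, h1, Bool.false_eq_true, if_false]
    exact ih (fun d hd => hs d (List.mem_cons_of_mem _ hd))

theorem pvCanon_append_underscores (suf : List Char) (hs : ∀ c ∈ suf, c = '_') (t : List Char) :
    ∀ mode, pvCanon (t ++ suf) mode = pvCanon t mode := by
  induction t with
  | nil =>
    intro mode
    cases mode
    · simpa using pvCanon_underscores suf hs
    · simp only [List.nil_append]
      cases suf with
      | nil => rfl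
      | cons c t1 =>
        have hc : c = '_' := hs c List.mem_cons_self
        subst hc
        have h1 : PySem.Chars.isalnum '_' = false := by decide
        have h2 : pvSep '_' = true := by decide
        simp only [pvCanon, h1, h2, Bool.false_eq_true, if_false, if_pos]
        rw [pvCanon_underscores t1 (fun d hd => hs d (List.mem_cons_of_mem _ hd))]
  | cons c t ih =>
    intro mode
    by_cases h1 : PySem.Chars.isalnum c
    · cases mode <;> simp [pvCanon, h1, ih]
    · by_cases h2 : pvSep c = true
      · cases mode <;> simp [pvCanon, h1, h2, ih]
      · cases mode <;> simp [pvCanon, h1, h2, ih]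

theorem pvCanon_dropWhile (m : List Char) :
    pvCanon (List.dropWhile (fun c => (['_'] : List Char).contains c) m) false = pvCanon m false := by
  induction m with
  | nil => rfl
  | cons c t ih =>
    by_cases hc : c = '_'
    · subst hc
      have h1 : PySem.Chars.isalnum '_' = false := by decide
      rw [List.dropWhile_cons_of_pos (by simp)]
      rw [ih]
      simp [pvCanon, h1]
    · rw [List.dropWhile_cons_of_neg (by simp [hc])]

-- invariance of pvCanon under the leading/trailing '_'-strip
theorem pvCanon_strip (m : List Char) :
    pvCanon (PySem.Chars.stripChars m ['_']) false = pvCanon m false := by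
  have hdef : PySem.Chars.stripChars m ['_'] =
      List.rdropWhile (fun c => (['_'] : List Char).contains c)
        (List.dropWhile (fun c => (['_'] : List Char).contains c) m) := rfl
  rw [hdef]
  set p : Char → Bool := fun c => (['_'] : List Char).contains c with hp
  set core := List.dropWhile p m with hcore
  have hsplit : List.rdropWhile p core ++ List.rtakeWhile p core = core :=
    List.rdropWhile_append_rtakeWhile
  have htake : ∀ c ∈ List.rtakeWhile p core, c = '_' := by
    intro c hc
    have := List.mem_rtakeWhile_imp hc
    simpa [hp] using this
  calc pvCanon (List.rdropWhile p core) false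
      = pvCanon (List.rdropWhile p core ++ List.rtakeWhile p core) false :=
        (pvCanon_append_underscores _ htake _ false).symm
    _ = pvCanon core false := by rw [hsplit]
    _ = pvCanon m false := pvCanon_dropWhile m

-- ===== VERDICT (by name: the statement is the Claim_ definition above) =====
theorem safe_file_stem_py_spec : Claim_equal_safe_file_stem_py := by
  intro name _
  unfold Spec_safe_file_stem_py safe_file_stem_py safe_file_stem_py_alt
  dsimp only
  rw [pvFoldA, pvFoldB]
  simp only [List.nil_append, List.isEmpty_nil, if_pos]
  congr 1
  set s := PySem.Chars.strip (PySem.Chars.lower name.toList) with hs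
  set p : Char → Bool := fun c => (['_'] : List Char).contains c with hp
  have hdef : PySem.Chars.stripChars (pvFilt s) ['_'] =
      List.rdropWhile p (List.dropWhile p (pvFilt s)) := rfl
  set core := List.dropWhile p (pvFilt s) with hcore
  have hdef : PySem.Chars.stripChars (pvFilt s) ['_'] = List.rdropWhile p core := rfl
  -- characters of stem are alphanumeric or '_'
  have hokf : ∀ c ∈ pvFilt s, pvOK c := by
    intro c hc
    rcases List.mem_filterMap.mp hc with ⟨a, _, ha⟩
    by_cases h1 : PySem.Chars.isalnum a
    · rw [if_pos h1] at ha
      exact Or.inl (Option.some_inj.mp ha ▸ h1)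
    · rw [if_neg h1] at ha
      by_cases h2 : pvSep a = true
      · rw [if_pos h2] at ha
        exact Or.inr (Option.some_inj.mp ha).symm
      · rw [if_neg h2] at ha; exact absurd ha (by simp)
  have hstem_sub : PySem.Chars.stripChars (pvFilt s) ['_'] ⊆ pvFilt s := by
    rw [hdef]
    exact fun c hc =>
      (List.dropWhile_sublist p).mem ((List.rdropWhile_prefix p core).subset hc)
  have hok : ∀ c ∈ PySem.Chars.stripChars (pvFilt s) ['_'], pvOK c :=
    fun c hc => hokf c (hstem_sub hc)
  -- stem neither starts nor ends with '_'
  have hlast : (PySem.Chars.stripChars (pvFilt s) ['_']).getLast? ≠ some '_' := by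
    rw [hdef]
    cases hne : List.rdropWhile p core with
    | nil => simp
    | cons d t1 =>
      rw [← hne, List.getLast?_eq_getLast (by rw [hne]; simp)]
      intro hcontra
      have := List.rdropWhile_last_not p core (by rw [hne]; simp)
      apply this
      simp only [Option.some_inj] at hcontra
      rw [hcontra, hp]
      simp
  have hhead : (PySem.Chars.stripChars (pvFilt s) ['_']).head? ≠ some '_' := by
    rw [hdef]
    cases hne : List.rdropWhile p core with
    | nil => simp
    | cons d t1 =>
      obtain ⟨r, hr⟩ := List.rdropWhile_prefix p core
      have hch : core.head? = some d := by
        rw [← hr, hne]; simp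
      have hcne : core ≠ [] := by rintro h; rw [h] at hch; simp at hch
      have hdnot : p d = false := by
        have hnot := List.head_dropWhile_not p (l := pvFilt s) (by rwa [← hcore])
        have hd_eq : core.head hcne = d := by
          rw [List.head?_eq_head hcne] at hch
          exact Option.some_inj.mp hch
        rw [← hd_eq]
        exact hnot
      intro hcontra
      simp only [List.head?_cons, Option.some_inj] at hcontra
      rw [hcontra] at hdnot
      simp [hp] at hdnot
  -- assemble
  set stem := PySem.Chars.stripChars (pvFilt s) ['_'] with hstem
  have hok' : ∀ c ∈ pvCollapse stem, pvOK c := fun c hc => hok c (pvCollapse_mem stem c hc)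
  have hl' := pvCollapse_getLast? stem hlast
  have hh' : (pvCollapse stem).head? ≠ some '_' := by
    rw [pvCollapse_head? stem]; exact hhead
  have hid := (pvCanon_id (pvCollapse stem)).2 hok' (pvCollapse_noDD stem) hl' hh'
  rw [← hid, pvCanon_collapse, hstem, pvCanon_strip, pvCanon_filt]
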